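-- pv_equiv track=rewrite | github.com/faycalki/Mosaic-Pattern-Word-Generator | A3-Kilali-Faycal.py | find_rectangle_sides
-- ===== SOURCE A (Python) =====
-- def find_rectangle_sides(rectangular_number):
--     for i in range(2, rectangular_number):
--         for j in range(2, rectangular_number):
--             if j * i == rectangular_number:
--                 rectangular_height = i
--                 rectangular_width = j
--                 return rectangular_width, rectangular_height
--     return rectangular_number, 1 # This is a case where the number is actually a prime number.
-- ===== SOURCE B (Python) =====
-- def find_rectangle_sides(rectangular_number):
--     i = 2
--     while i * i <= rectangular_number:
--         if rectangular_number % i == 0: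
--             return rectangular_number // i, i
--         i += 1
--     return rectangular_number, 1
-- ===== Notes on version B (the rewrite author's own statement) =====
-- stated objective: faster
-- what changed: Replaced the O(n^2) nested scan over all (i,j) pairs by a single trial-division loop up to sqrt(n) returning (n//i, i) at the smallest divisor.
import Mathlib
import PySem

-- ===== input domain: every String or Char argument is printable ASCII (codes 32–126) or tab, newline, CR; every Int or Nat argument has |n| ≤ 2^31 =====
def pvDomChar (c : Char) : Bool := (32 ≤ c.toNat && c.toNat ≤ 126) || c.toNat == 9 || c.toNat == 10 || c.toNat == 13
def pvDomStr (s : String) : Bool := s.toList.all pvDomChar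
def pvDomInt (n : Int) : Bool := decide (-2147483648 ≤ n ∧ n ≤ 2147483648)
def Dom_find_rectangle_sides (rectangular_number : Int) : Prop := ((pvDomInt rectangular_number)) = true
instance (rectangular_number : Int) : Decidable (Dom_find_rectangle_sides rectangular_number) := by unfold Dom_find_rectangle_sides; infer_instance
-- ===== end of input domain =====

-- B replaces A's O(n^2) nested scan over all (i,j) pairs by trial division up to sqrt(n) (objective: faster).

-- ===== PORT A =====
-- A: for i in range(2,n): for j in range(2,n): if j*i==n: return (j,i); return (n,1)
-- inner loop = first j in range(2,n) with j*i==n; outer loop = first i whose inner loop returns.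
def find_rectangle_sides (rectangular_number : Int) : List Int :=
  match (PySem.List.pyRange 2 rectangular_number 1).findSome? (fun i =>
      ((PySem.List.pyRange 2 rectangular_number 1).find? (fun j => j * i == rectangular_number)).map
        (fun j => (j, i))) with
  | some (j, i) => [j, i]
  | none => [rectangular_number, 1]

-- ===== PORT B =====
-- B: i = 2; while i*i <= n: if n % i == 0: return (n//i, i); i += 1; return (n, 1)
def pvBLoop (n i : Int) (hi : 2 ≤ i) : List Int :=
  if h : i * i ≤ n then
    if PySem.Int.mod n i == 0 then [PySem.Int.floordiv n i, i]
    else pvBLoop n (i + 1) (by omega)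
  else [n, 1]
termination_by (n - i).toNat
decreasing_by
  have h2 : 2 * i ≤ i * i := by nlinarith
  omega

def find_rectangle_sides_alt (rectangular_number : Int) : List Int :=
  pvBLoop rectangular_number 2 (by omega)

-- ===== PRECONDITION & SPEC =====
def Spec_find_rectangle_sides (rectangular_number : Int) (out : List Int) : Prop := out = find_rectangle_sides_alt rectangular_number
instance (rectangular_number : Int) (out : List Int) : Decidable (Spec_find_rectangle_sides rectangular_number out) := by unfold Spec_find_rectangle_sides; infer_instance

-- ===== CLAIM (what is proved, stated in full; the proofs are below) =====
def Claim_equal_find_rectangle_sides : Prop := ∀ (rectangular_number : Int), Dom_find_rectangle_sides rectangular_number → Spec_find_rectangle_sides rectangular_number (find_rectangle_sides rectangular_number)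

-- ===== LEMMAS AND PROOFS =====

-- findSome? over a decomposed list whose first hit is x.
theorem pv_findSome?_first {α β : Type} (l l1 l2 : List α) (x : α) (f : α → Option β) (v : β)
    (hl : l = l1 ++ x :: l2) (h1 : ∀ y ∈ l1, f y = none) (hx : f x = some v) :
    l.findSome? f = some v := by
  subst hl
  rw [List.findSome?_append, List.findSome?_eq_none_iff.mpr h1, Option.none_or]
  simp [List.findSome?_cons, hx]

-- When no i with 2 ≤ i, i*i ≤ n divides n, B's loop runs to the end and returns [n, 1].
theorem pvBLoop_of_none (n : Int)
    (hS : ∀ i : Int, 2 ≤ i → i * i ≤ n → ¬ i ∣ n) :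
    ∀ (k : Nat) (i : Int) (hi : 2 ≤ i), (n - i).toNat ≤ k → pvBLoop n i hi = [n, 1] := by
  intro k
  induction k with
  | zero =>
    intro i hi hk
    rw [pvBLoop]
    have hni : n ≤ i := by omega
    have : ¬ i * i ≤ n := by nlinarith
    simp [this]
  | succ k ih =>
    intro i hi hk
    rw [pvBLoop]
    by_cases h : i * i ≤ n
    · have hnd : ¬ i ∣ n := hS i hi h
      have hm : ¬ (PySem.Int.mod n i == 0) = true := by
        simp [PySem.Int.mod_eq_zero_iff_dvd]; exact hnd
      have h2 : 2 * i ≤ i * i := by nlinarith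
      simp only [h, dite_true, hm, if_false]
      exact ih (i + 1) (by omega) (by omega)
    · simp [h]

-- When p is the least i ≥ 2 with i*i ≤ n and i ∣ n, B's loop stops at p.
theorem pvBLoop_of_least (n p : Int) (hp2 : 2 ≤ p) (hpp : p * p ≤ n) (hpd : p ∣ n)
    (hmin : ∀ i : Int, 2 ≤ i → i * i ≤ n → i ∣ n → p ≤ i) :
    ∀ (k : Nat) (i : Int) (hi : 2 ≤ i), i ≤ p → (p - i).toNat ≤ k →
      pvBLoop n i hi = [PySem.Int.floordiv n p, p] := by
  intro k
  induction k with
  | zero =>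
    intro i hi hip hk
    have : i = p := by omega
    subst this
    rw [pvBLoop]
    have hm : (PySem.Int.mod n i == 0) = true := by
      simp [PySem.Int.mod_eq_zero_iff_dvd]; exact hpd
    simp [hpp, hm]
  | succ k ih =>
    intro i hi hip hk
    by_cases hip' : i = p
    · subst hip'
      rw [pvBLoop]
      have hm : (PySem.Int.mod n i == 0) = true := by
        simp [PySem.Int.mod_eq_zero_iff_dvd]; exact hpd
      simp [hpp, hm]
    · have hlt : i < p := lt_of_le_of_ne hip hip'
      rw [pvBLoop]
      have hii : i * i ≤ n := by nlinarith
      have hnd : ¬ i ∣ n := fun hd => absurd (hmin i hi hii hd) (by omega)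
      have hm : ¬ (PySem.Int.mod n i == 0) = true := by
        simp [PySem.Int.mod_eq_zero_iff_dvd]; exact hnd
      simp only [hii, dite_true, hm, if_false]
      exact ih (i + 1) (by omega) (by omega) (by omega)

-- If i does not admit a partner j in [2, n) with j*i = n (because every small divisor is ≥ p
-- and i < p), A's inner find? fails.
theorem inner_none_of_lt_least (n p i : Int) (hi : 2 ≤ i) (hip : i < p)
    (hmin : ∀ m : Int, 2 ≤ m → m * m ≤ n → m ∣ n → p ≤ m) :
    (PySem.List.pyRange 2 n 1).find? (fun j => j * i == n) = none := by
  apply List.find?_eq_none.mpr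
  intro j hj
  simp only [PySem.List.mem_pyRange_one] at hj
  simp only [beq_iff_eq]
  intro hji
  have hj2 : 2 ≤ j := hj.1
  have hidvd : i ∣ n := ⟨j, by linarith [mul_comm j i]⟩
  by_cases hii : i * i ≤ n
  · exact absurd (hmin i hi hii hidvd) (by omega)
  · -- n < i*i = too big, so j < i; then j is a smaller divisor with j*j < n
    have hji' : j < i := by nlinarith
    have hjdvd : j ∣ n := ⟨i, hji.symm⟩
    have hjj : j * j ≤ n := by nlinarith
    exact absurd (hmin j hj2 hjj hjdvd) (by omega)

-- A's inner find? at i = p returns exactly n / p.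
theorem inner_some_at_least (n p : Int) (hp2 : 2 ≤ p) (hpp : p * p ≤ n) (hpd : p ∣ n) :
    (PySem.List.pyRange 2 n 1).find? (fun j => j * p == n) = some (n / p) := by
  set j0 : Int := n / p with hj0
  have hp0 : (0 : Int) < p := by omega
  have hj0p : j0 * p = n := Int.ediv_mul_cancel hpd
  have hj02 : p ≤ j0 := (Int.le_ediv_iff_mul_le hp0).mpr hpp
  have hn4 : 4 ≤ n := by nlinarith
  have hj0n : j0 < n := by nlinarith
  have hsplit : PySem.List.pyRange 2 n 1 =
      PySem.List.pyRange 2 j0 1 ++ PySem.List.pyRange j0 n 1 :=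
    PySem.List.pyRange_one_append 2 j0 n (by omega) (by omega)
  rw [hsplit, List.find?_append]
  have h1 : (PySem.List.pyRange 2 j0 1).find? (fun j => j * p == n) = none := by
    apply List.find?_eq_none.mpr
    intro j hj
    simp only [PySem.List.mem_pyRange_one] at hj
    simp only [beq_iff_eq]
    intro hjp
    have : j = j0 := by
      have := hj0p
      nlinarith [hj.2]
    omega
  rw [h1, Option.none_or]
  rw [PySem.List.pyRange_one_cons (by omega : j0 < n)]
  simp [List.find?_cons, hj0p]

-- main equivalence
theorem pv_main (n : Int) : find_rectangle_sides n = find_rectangle_sides_alt n := by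
  by_cases hS : ∃ i : Int, 2 ≤ i ∧ i * i ≤ n ∧ i ∣ n
  · -- extract the least such i as p = 2 + Nat.find
    obtain ⟨i0, hi02, hi0p, hi0d⟩ := hS
    have hQ : ∃ k : Nat, (2 + (k : Int)) * (2 + (k : Int)) ≤ n ∧ n % (2 + (k : Int)) = 0 := by
      refine ⟨(i0 - 2).toNat, ?_⟩
      have hc : (((i0 - 2).toNat : Int)) = i0 - 2 := by omega
      rw [hc]
      have h1 : 2 + (i0 - 2) = i0 := by ring
      rw [h1]
      exact ⟨hi0p, Int.emod_eq_zero_of_dvd hi0d⟩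
    classical
    set k0 := Nat.find hQ with hk0
    set p : Int := 2 + (k0 : Int) with hpdef
    have hspec := Nat.find_spec hQ
    rw [← hk0] at hspec
    have hp2 : 2 ≤ p := by omega
    have hpp : p * p ≤ n := hspec.1
    have hpd : p ∣ n := Int.dvd_of_emod_eq_zero hspec.2
    have hmin : ∀ i : Int, 2 ≤ i → i * i ≤ n → i ∣ n → p ≤ i := by
      intro i hi2 hii hid
      by_contra hlt
      push_neg at hlt
      have hk : (i - 2).toNat < k0 := by omega
      have := Nat.find_min hQ hk
      apply this
      have hc : (((i - 2).toNat : Int)) = i - 2 := by omega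
      rw [hc]
      have h1 : 2 + (i - 2) = i := by ring
      rw [h1]
      exact ⟨hii, Int.emod_eq_zero_of_dvd hid⟩
    -- shared facts
    have hp0 : (0 : Int) < p := by omega
    have hn4 : 4 ≤ n := by nlinarith
    have hpn : p < n := by nlinarith
    -- A side
    have hA : find_rectangle_sides n = [n / p, p] := by
      unfold find_rectangle_sides
      have hdecomp : PySem.List.pyRange 2 n 1 =
          PySem.List.pyRange 2 p 1 ++ p :: PySem.List.pyRange (p + 1) n 1 := by
        rw [PySem.List.pyRange_one_append 2 p n (by omega) (by omega),
            PySem.List.pyRange_one_cons (by omega : p < n)]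
      rw [pv_findSome?_first (PySem.List.pyRange 2 n 1) (PySem.List.pyRange 2 p 1)
            (PySem.List.pyRange (p + 1) n 1) p _ ((n / p, p) : Int × Int) hdecomp
            (by
              intro i hi
              simp only [PySem.List.mem_pyRange_one] at hi
              rw [inner_none_of_lt_least n p i hi.1 hi.2 hmin]
              rfl)
            (by rw [inner_some_at_least n p hp2 hpp hpd]; rfl)]
    -- B side
    have hB : find_rectangle_sides_alt n = [n / p, p] := by
      unfold find_rectangle_sides_alt
      rw [pvBLoop_of_least n p hp2 hpp hpd hmin (p - 2).toNat 2 (by omega) (by omega) (by omega)]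
      rw [PySem.Int.floordiv_eq_ediv_of_pos hp0]
    rw [hA, hB]
  · -- no admissible divisor: both return [n, 1]
    push_neg at hS
    have hA : find_rectangle_sides n = [n, 1] := by
      unfold find_rectangle_sides
      have h1 : (PySem.List.pyRange 2 n 1).findSome? (fun i =>
          ((PySem.List.pyRange 2 n 1).find? (fun j => j * i == n)).map (fun j => (j, i))) = none := by
        apply List.findSome?_eq_none_iff.mpr
        intro i hi
        simp only [PySem.List.mem_pyRange_one] at hi
        have hfind : (PySem.List.pyRange 2 n 1).find? (fun j => j * i == n) = none := by
          apply List.find?_eq_none.mpr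
          intro j hj
          simp only [PySem.List.mem_pyRange_one] at hj
          simp only [beq_iff_eq]
          intro hji
          by_cases hij : i ≤ j
          · have hii : i * i ≤ n := by nlinarith [hi.1, hj.1]
            exact hS i hi.1 hii ⟨j, by linarith [mul_comm j i]⟩
          · push_neg at hij
            have hjj : j * j ≤ n := by nlinarith [hi.1, hj.1]
            exact hS j hj.1 hjj ⟨i, hji.symm⟩
        rw [hfind]; rfl
      rw [h1]
    have hB : find_rectangle_sides_alt n = [n, 1] := by
      unfold find_rectangle_sides_alt
      exact pvBLoop_of_none n (fun i h1 h2 h3 => hS i h1 h2 h3) (n - 2).toNat 2 (by omega) (by omega)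
    rw [hA, hB]

-- ===== VERDICT (by name: the statement is the Claim_ definition above) =====
theorem find_rectangle_sides_spec : Claim_equal_find_rectangle_sides := by
  intro n _
  unfold Spec_find_rectangle_sides
  exact pv_main n
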